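-- pv_equiv track=rewrite | github.com/mikegorlin/OpenUnderwriter | src/do_uw/brain/brain_build_signals.py | _check_cross_references
-- ===== SOURCE A (Python) =====
-- from typing import Any
--
-- def _check_cross_references(
--     signals: list[dict[str, Any]],
-- ) -> list[str]:
--     """Validate cross-reference integrity across signals.
--
--     Checks:
--     - Signal IDs are unique
--     - All referenced factor IDs exist in known set
--
--     Returns list of error messages (empty = all good).
--     """
--     errors: list[str] = []
--
--     # Check signal ID uniqueness
--     seen_ids: dict[str, int] = {}
--     for sig in signals:
--         sid = sig.get("id", sig.get("signal_id", "unknown"))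
--         seen_ids[sid] = seen_ids.get(sid, 0) + 1
--
--     dupes = {sid: count for sid, count in seen_ids.items() if count > 1}
--     if dupes:
--         for sid, count in sorted(dupes.items()):
--             errors.append(f"Duplicate signal ID '{sid}' appears {count} times")
--
--     return errors
-- ===== SOURCE B (Python) =====
-- def _check_cross_references(signals):
--     """Validate cross-reference integrity across signals.
--
--     Sort-then-scan: collect every ID (with repeats), sort the full list
--     once, then a single pass over the sorted list tracks the current run
--     (value, length) and emits one message per run longer than 1.
--     No counting dict and no per-candidate counting at all.
--     """
--     ids = sorted(sig.get("id", sig.get("signal_id", "unknown")) for sig in signals)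
--     errors = []
--     cur = None
--     cnt = 0
--     for v in ids:
--         if cnt > 0 and cur == v:
--             cnt += 1
--         else:
--             if cnt > 1:
--                 errors.append(f"Duplicate signal ID '{cur}' appears {cnt} times")
--             cur = v
--             cnt = 1
--     if cnt > 1:
--         errors.append(f"Duplicate signal ID '{cur}' appears {cnt} times")
--     return errors
-- ===== Notes on version B (the rewrite author's own statement) =====
-- stated objective: alternative
-- what changed: Replaces A's counting dict + dupes-dict comprehension + sort of the dupe items by sorting the full id list once and a single run-length scan (current value + run count accumulator) that emits a message whenever a run longer than 1 ends.
import Mathlib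
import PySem

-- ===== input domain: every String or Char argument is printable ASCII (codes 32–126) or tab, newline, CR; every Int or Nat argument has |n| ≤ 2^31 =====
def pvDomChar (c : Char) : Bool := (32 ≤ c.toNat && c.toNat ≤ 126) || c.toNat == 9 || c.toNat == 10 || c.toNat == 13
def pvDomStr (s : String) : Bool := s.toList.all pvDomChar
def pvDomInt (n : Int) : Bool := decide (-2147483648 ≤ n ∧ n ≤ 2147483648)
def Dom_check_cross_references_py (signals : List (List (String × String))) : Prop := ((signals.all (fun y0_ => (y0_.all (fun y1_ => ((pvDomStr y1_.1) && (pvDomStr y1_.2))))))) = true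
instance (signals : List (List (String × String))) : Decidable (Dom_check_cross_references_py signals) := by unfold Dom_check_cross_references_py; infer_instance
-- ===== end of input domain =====

-- B replaces A's counting dict + dupes dict + sort of dupe items by sorting the full id
-- list once and a single run-length scan over it (alternative decomposition, same result).


-- sid = sig.get("id", sig.get("signal_id", "unknown")) — shared helper of both Pythons
def pvSid (sig : List (String × String)) : String :=
  (PySem.Dict.mk sig).getD "id" ((PySem.Dict.mk sig).getD "signal_id" "unknown")

-- ===== PORT A =====
def check_cross_references_py (signals : List (List (String × String))) : List String :=
  let errors : List String := []
  -- seen_ids[sid] = seen_ids.get(sid, 0) + 1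
  let seen : PySem.Dict String Int :=
    signals.foldl (fun d sig => d.insert (pvSid sig) (d.getD (pvSid sig) 0 + 1)) PySem.Dict.empty
  -- dupes = {sid: count for sid, count in seen_ids.items() if count > 1}
  let dupes : PySem.Dict String Int :=
    PySem.Dict.ofList (seen.items.filter (fun p => decide (1 < p.2)))
  if dupes.items ≠ [] then
    errors ++ (PySem.List.sorted2 dupes.items (fun p => p.1) (fun p => p.2)).map
      (fun p => "Duplicate signal ID '" ++ p.1 ++ "' appears " ++ PySem.Int.toStr p.2 ++ " times")
  else errors

-- ===== PORT B =====
-- f"Duplicate signal ID '{cur}' appears {cnt} times"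
def pvMsg (v : String) (k : Nat) : String :=
  "Duplicate signal ID '" ++ v ++ "' appears " ++ PySem.Int.toStr (k : Int) ++ " times"

-- loop body: state = (errors, cur, cnt); 'cnt > 0 and cur == v' then cnt += 1, else flush+reset
def pvStep (st : List String × Option String × Nat) (v : String) :
    List String × Option String × Nat :=
  if 0 < st.2.2 ∧ st.2.1 = some v then (st.1, st.2.1, st.2.2 + 1)
  else ((if 1 < st.2.2 then st.1 ++ [pvMsg (st.2.1.getD "") st.2.2] else st.1), some v, 1)

-- trailing 'if cnt > 1: errors.append(...)'
def pvFinish (st : List String × Option String × Nat) : List String :=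
  if 1 < st.2.2 then st.1 ++ [pvMsg (st.2.1.getD "") st.2.2] else st.1

def check_cross_references_py_alt (signals : List (List (String × String))) : List String :=
  let ids := PySem.List.sorted (signals.map pvSid) (fun v => v)
  pvFinish (ids.foldl pvStep ([], none, 0))

-- ===== PRECONDITION & SPEC =====
def Spec_check_cross_references_py (signals : List (List (String × String))) (out : List String) : Prop := out = check_cross_references_py_alt signals
instance (signals : List (List (String × String))) (out : List String) : Decidable (Spec_check_cross_references_py signals out) := by unfold Spec_check_cross_references_py; infer_instance

-- ===== CLAIM (what is proved, stated in full; the proofs are below) =====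
def Claim_equal_check_cross_references_py : Prop := ∀ (signals : List (List (String × String))), Dom_check_cross_references_py signals → Spec_check_cross_references_py signals (check_cross_references_py signals)

-- ===== LEMMAS AND PROOFS =====

-- "A's sorted duplicate report" as a function of a plain id multiset
def pvRunOut (s : List String) : List String :=
  ((PySem.Set.ofList s).filter (fun v => decide (1 < s.count v))).map
    (fun v => pvMsg v (s.count v))

theorem pv_insertBy_congr {α : Type} (b1 b2 : α → α → Bool) (x : α) (acc : List α)
    (h : ∀ y ∈ acc, b1 x y = b2 x y) :
    PySem.List.insertBy b1 x acc = PySem.List.insertBy b2 x acc := by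
  induction acc with
  | nil => rfl
  | cons y ys ih =>
      simp only [PySem.List.insertBy, h y (by simp)]
      split <;> simp_all

theorem pv_foldl_insertBy_congr {α : Type} (b1 b2 : α → α → Bool) (S : List α)
    (h : ∀ x ∈ S, ∀ y ∈ S, b1 x y = b2 x y) :
    ∀ (l acc : List α), (∀ x ∈ l, x ∈ S) → (∀ y ∈ acc, y ∈ S) →
      l.foldl (fun acc x => PySem.List.insertBy b1 x acc) acc
        = l.foldl (fun acc x => PySem.List.insertBy b2 x acc) acc := by
  intro l
  induction l with
  | nil => intro acc _ _; rfl
  | cons x xs ih =>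
      intro acc hl hacc
      simp only [List.foldl_cons]
      rw [pv_insertBy_congr b1 b2 x acc (fun y hy => h x (hl x (by simp)) y (hacc y hy))]
      exact ih _ (fun z hz => hl z (by simp [hz]))
        (fun y hy => ((PySem.List.mem_insertBy b2 x y acc).1 hy).elim
          (fun e => e ▸ hl x (by simp)) (hacc y))

theorem pv_sorted2_eq_sorted (xs : List (String × Int))
    (hnd : (xs.map Prod.fst).Nodup) :
    PySem.List.sorted2 xs (fun p => p.1) (fun p => p.2)
      = PySem.List.sorted xs (fun p => p.1) := by
  rw [PySem.List.sorted_eq_foldl_insertBy]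
  show xs.foldl (fun acc x => PySem.List.insertBy _ x acc) [] = _
  apply pv_foldl_insertBy_congr _ _ xs _ xs [] (fun _ h => h) (by simp)
  intro x hx y hy
  by_cases hfst : x.1 = y.1
  · have : x = y := List.inj_on_of_nodup_map hnd hx hy hfst
    subst this
    simp
  · rcases lt_or_gt_of_ne hfst with hlt | hgt
    · simp [hlt, not_lt.2 (le_of_lt hlt)]
    · simp [hgt, not_lt.2 (le_of_lt hgt)]

theorem pv_items_update (l : List (String × Int)) :
    ∀ (d : PySem.Dict String Int), (∀ p ∈ l, d.contains p.1 = false) →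
      (l.map Prod.fst).Nodup → (d.update l).items = d.items ++ l := by
  induction l with
  | nil => intro d _ _; simp [PySem.Dict.update]
  | cons p t ih =>
      intro d hd hnd
      have hc : d.contains p.1 = false := hd p (by simp)
      have hins : (d.insert p.1 p.2).items = d.items ++ [p] := by
        simp [PySem.Dict.insert, hc]
      have hupd : (d.update (p :: t)) = ((d.insert p.1 p.2).update t) := by
        simp [PySem.Dict.update]
      rw [hupd, ih (d.insert p.1 p.2) ?_ (by simp at hnd; exact hnd.2), hins]
      · simp
      · intro q hq
        have hqd : d.contains q.1 = false := hd q (by simp [hq])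
        have hne : (p.1 == q.1) = false := by
          simp only [List.map_cons, List.nodup_cons] at hnd
          have : q.1 ∈ t.map Prod.fst := List.mem_map_of_mem hq
          simp only [beq_eq_false_iff_ne, ne_eq]
          exact fun e => hnd.1 (e ▸ this)
        simp [PySem.Dict.contains, hins, List.any_append] at hqd ⊢
        exact ⟨hqd, by simpa using hne⟩

theorem pv_items_ofList (l : List (String × Int)) (h : (l.map Prod.fst).Nodup) :
    (PySem.Dict.ofList l).items = l := by
  have := pv_items_update l PySem.Dict.empty (fun p _ => by simp [PySem.Dict.contains, PySem.Dict.empty]) h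
  simpa [PySem.Dict.ofList, PySem.Dict.empty] using this

-- Set.ofList keeps a subsequence of its argument (first occurrences, in order)
theorem pv_ofList_sublist {α : Type} [DecidableEq α] (s : List α) :
    (PySem.Set.ofList s).Sublist s := by
  induction s with
  | nil => simp [PySem.Set.ofList, PySem.Set.empty]
  | cons x xs ih =>
      rw [PySem.Set.ofList_cons]
      exact List.Sublist.cons₂ x (List.Sublist.trans List.filter_sublist ih)

-- ofList commutes with filter
theorem pv_ofList_filter {α : Type} [DecidableEq α] (p : α → Bool) (s : List α) :
    PySem.Set.ofList (s.filter p) = (PySem.Set.ofList s).filter p := by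
  induction s with
  | nil => simp [PySem.Set.ofList, PySem.Set.empty]
  | cons x xs ih =>
      by_cases hp : p x = true
      · rw [List.filter_cons_of_pos hp, PySem.Set.ofList_cons, PySem.Set.ofList_cons,
            List.filter_cons_of_pos hp, ih]
        show _ :: List.filter _ (List.filter _ _) = _ :: List.filter _ (List.filter _ _)
        rw [List.filter_filter, List.filter_filter]
        congr 1
        apply List.filter_congr
        intro a _
        simp [Bool.and_comm]
      · rw [List.filter_cons_of_neg hp, PySem.Set.ofList_cons, ih]
        simp only [PySem.Set.discard]
        rw [List.filter_cons_of_neg hp, List.filter_filter]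
        apply List.filter_congr
        intro a _
        by_cases h : p a = true
        · have hax : ¬ a = x := fun e => hp (e ▸ h)
          simp [h, hax]
        · have h' : p a = false := eq_false_of_ne_true h
          simp [h']

-- peeling one run off pvRunOut: the head value's run, then the report of the rest
theorem pv_runOut_cons (v : String) (s' : List String) :
    pvRunOut (v :: s')
      = (if 1 < 1 + s'.count v then [pvMsg v (1 + s'.count v)] else [])
          ++ pvRunOut (s'.filter (fun y => !(y == v))) := by
  have hvcount : (v :: s').count v = 1 + s'.count v := by
    simp; omega
  have key : ∀ a ∈ PySem.Set.ofList (s'.filter (fun y => !(y == v))),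
      a ≠ v ∧ (v :: s').count a = (s'.filter (fun y => !(y == v))).count a := by
    intro a ha
    have haF : a ∈ s'.filter (fun y => !(y == v)) :=
      (PySem.Set.mem_ofList (s'.filter (fun y => !(y == v))) a).1 ha
    have hane : a ≠ v := by
      have := (List.mem_filter.1 haF).2
      simpa using this
    refine ⟨hane, ?_⟩
    have h1 : (s'.filter (fun y => !(y == v))).count a = s'.count a :=
      List.count_filter (by simp [hane])
    rw [h1, List.count_cons]
    simp [Ne.symm hane]
  unfold pvRunOut
  rw [PySem.Set.ofList_cons]
  show ((v :: PySem.Set.discard (PySem.Set.ofList s') v).filter _).map _ = _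
  have hdisc : PySem.Set.discard (PySem.Set.ofList s') v
      = PySem.Set.ofList (s'.filter (fun y => !(y == v))) := by
    rw [pv_ofList_filter]
    rfl
  rw [hdisc, List.filter_cons]
  have hpq : ∀ a ∈ PySem.Set.ofList (s'.filter (fun y => !(y == v))),
      (decide (1 < (v :: s').count a) : Bool)
        = decide (1 < (s'.filter (fun y => !(y == v))).count a) :=
    fun a ha => by rw [(key a ha).2]
  have htail : ((PySem.Set.ofList (s'.filter (fun y => !(y == v)))).filter
        (fun a => decide (1 < (v :: s').count a))).map
        (fun a => pvMsg a ((v :: s').count a))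
      = pvRunOut (s'.filter (fun y => !(y == v))) := by
    unfold pvRunOut
    rw [List.filter_congr hpq]
    apply List.map_congr_left
    intro a ha
    rw [(key a (List.mem_of_mem_filter ha)).2]
  by_cases hdup : 1 < 1 + s'.count v
  · rw [if_pos (by simpa [hvcount] using hdup), if_pos hdup, List.map_cons, htail, hvcount]
    rfl
  · rw [if_neg (by simpa [hvcount] using hdup), if_neg hdup, htail, List.nil_append]
    rfl

-- invariant of B's scan: mid-run state over the rest of a sorted list
theorem pv_scan_invariant :
    ∀ (s : List String), s.Pairwise (· ≤ ·) →
      ∀ (errors : List String) (x : String) (c : Nat), 0 < c → (∀ y ∈ s, x ≤ y) →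
        pvFinish (s.foldl pvStep (errors, some x, c))
          = errors ++ (if 1 < c + s.count x then [pvMsg x (c + s.count x)] else [])
              ++ pvRunOut (s.filter (fun y => !(y == x))) := by
  intro s
  induction s with
  | nil =>
      intro _ errors x c hc _
      unfold pvFinish pvRunOut
      simp only [List.foldl_nil, List.count_nil, List.filter_nil, Nat.add_zero,
        PySem.Set.ofList, PySem.Set.empty, List.map_nil, List.append_nil]
      split_ifs <;> simp
  | cons v s' ih =>
      intro hs errors x c hc hlb
      by_cases hvx : x = v
      · subst hvx
        have hstep : pvStep (errors, some x, c) x = (errors, some x, c + 1) := by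
          simp [pvStep, hc]
        rw [List.foldl_cons, hstep,
            ih (List.Pairwise.sublist (List.sublist_cons_self x s') hs) errors x (c + 1)
              (by omega) (fun y hy => hlb y (by simp [hy]))]
        have : (x :: s').count x = 1 + s'.count x := by simp; omega
        rw [List.filter_cons_of_neg (by simp)]
        rw [this]
        have harith : c + 1 + s'.count x = c + (1 + s'.count x) := by omega
        rw [harith]
      · -- v ≠ x: x never occurs again (everything from here on is ≥ v > x)
        have hxv : x < v := lt_of_le_of_ne (hlb v (by simp)) hvx
        have hnox : ∀ y ∈ v :: s', y ≠ x := by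
          intro y hy
          rcases List.mem_cons.1 hy with h | h
          · exact h ▸ (ne_of_gt hxv)
          · exact ne_of_gt (lt_of_lt_of_le hxv (List.rel_of_pairwise_cons hs h))
        have hcount0 : (v :: s').count x = 0 := by
          rw [List.count_eq_zero]
          exact fun hx => (hnox x hx) rfl
        have hstep : pvStep (errors, some x, c) v
            = ((if 1 < c then errors ++ [pvMsg x c] else errors), some v, 1) := by
          simp only [pvStep]
          rw [if_neg (by simp [hvx])]
          rfl
        rw [List.foldl_cons, hstep,
            ih (List.Pairwise.sublist (List.sublist_cons_self v s') hs) _ v 1 (by omega)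
              (fun y hy => List.rel_of_pairwise_cons hs hy)]
        have hfx : (v :: s').filter (fun y => !(y == x)) = v :: s' := by
          apply List.filter_eq_self.2
          intro y hy
          simpa using hnox y hy
        rw [hfx, hcount0, pv_runOut_cons v s']
        by_cases h1c : 1 < c
        · simp [h1c, List.append_assoc]
        · simp [h1c, List.append_assoc]

-- B's whole scan of a sorted list produces A's sorted duplicate report
theorem pv_scan_eq_runOut (s : List String) (hs : s.Pairwise (· ≤ ·)) :
    pvFinish (s.foldl pvStep ([], none, 0)) = pvRunOut s := by
  cases s with
  | nil => simp [pvFinish, pvRunOut, PySem.Set.ofList, PySem.Set.empty]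
  | cons v s' =>
      have hstep : pvStep ([], none, 0) v = ([], some v, 1) := by
        simp [pvStep]
      rw [List.foldl_cons, hstep,
          pv_scan_invariant s' (List.Pairwise.sublist (List.sublist_cons_self v s') hs)
            [] v 1 (by omega) (fun y hy => List.rel_of_pairwise_cons hs hy),
          pv_runOut_cons v s']
      simp

-- ===== VERDICT (by name: the statement is the Claim_ definition above) =====
theorem check_cross_references_py_spec : Claim_equal_check_cross_references_py := by
  intro signals _
  unfold Spec_check_cross_references_py check_cross_references_py check_cross_references_py_alt
  dsimp only
  set ids := signals.map pvSid with hids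
  set s := PySem.List.sorted ids (fun v => v) with hsdef
  have hsp : s.Pairwise (· ≤ ·) := by
    have := PySem.List.sorted_pairwise ids (fun v => v)
    simpa using this
  have hperm : s.Perm ids := PySem.List.sorted_perm ids (fun v => v) false
  have hcount : ∀ v, ids.count v = s.count v := fun v => (hperm.count_eq v).symm
  -- A side: seen = counter ids
  have hseen : signals.foldl (fun d sig => d.insert (pvSid sig) (d.getD (pvSid sig) 0 + 1))
      PySem.Dict.empty = PySem.Dict.counter ids := by
    rw [← PySem.Dict.foldl_insert_getD_add_one_eq_counter, hids, List.foldl_map]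
  rw [hseen]
  have hL : (PySem.Dict.counter ids).items.filter (fun p => decide (1 < p.2))
      = ((PySem.Set.ofList ids).filter (fun k => decide (1 < ids.count k))).map
          (fun k => (k, (ids.count k : Int))) := by
    rw [PySem.Dict.items_counter, List.filter_map]
    congr 1
    apply List.filter_congr
    intro k _
    simp [Function.comp]
  set L := ((PySem.Set.ofList ids).filter (fun k => decide (1 < ids.count k))).map
      (fun k => (k, (ids.count k : Int))) with hLdef
  have hndL : (L.map Prod.fst).Nodup := by
    rw [hLdef, List.map_map]
    simpa [Function.comp_def] using (PySem.Set.nodup_ofList ids).filter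
      (fun k => decide (1 < ids.count k))
  rw [hL, pv_items_ofList L hndL]
  -- sorted(set(ids)) = set(sorted(ids)) — both are the strictly increasing arrangement
  have hseteq : PySem.List.sorted (PySem.Set.ofList ids) (fun v => v)
      = PySem.Set.ofList s := by
    apply PySem.List.sorted_eq_of_perm_of_pairwise_lt
    · refine (List.perm_ext_iff_of_nodup (PySem.Set.nodup_ofList s)
        (PySem.Set.nodup_ofList ids)).2 ?_
      intro a
      rw [PySem.Set.mem_ofList, PySem.Set.mem_ofList, hsdef, PySem.List.mem_sorted]
    · have hle : (PySem.Set.ofList s).Pairwise (· ≤ ·) :=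
        List.Pairwise.sublist (pv_ofList_sublist s) hsp
      have hne : (PySem.Set.ofList s).Pairwise (· ≠ ·) := PySem.Set.nodup_ofList s
      exact (hle.and hne).imp (fun h => lt_of_le_of_ne h.1 h.2)
  have hsort : PySem.List.sorted L (fun p => p.1)
      = ((PySem.Set.ofList s).filter (fun v => decide (1 < ids.count v))).map
          (fun k => (k, (ids.count k : Int))) := by
    apply PySem.List.sorted_eq_of_perm_of_pairwise_lt
    · rw [hLdef, ← hseteq]
      exact (((PySem.List.sorted_perm (PySem.Set.ofList ids) (fun v => v) false).filter _).map _)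
    · rw [List.pairwise_map]
      have := (hseteq ▸ PySem.List.sorted_ofList_pairwise_lt ids)
      exact this.filter _
  by_cases hnil : L = []
  · -- dupes empty: A returns []; B's report is empty too since no id repeats
    have h0 : (PySem.Set.ofList ids).filter (fun k => decide (1 < ids.count k)) = [] :=
      List.map_eq_nil_iff.1 (hLdef ▸ hnil)
    have hnone : ∀ a ∈ PySem.Set.ofList s, (decide (1 < s.count a)) = false := by
      intro a ha
      have hmem : a ∈ PySem.Set.ofList ids := by
        rw [PySem.Set.mem_ofList]
        exact hperm.mem_iff.1 ((PySem.Set.mem_ofList s a).1 ha)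
      have := List.filter_eq_nil_iff.1 h0 a hmem
      simpa [hcount a] using this
    rw [if_neg (by simpa using hnil)]
    rw [pv_scan_eq_runOut s hsp]
    unfold pvRunOut
    rw [List.filter_eq_nil_iff.2 (fun a ha => by simp [hnone a ha])]
    simp
  · rw [if_pos hnil, pv_sorted2_eq_sorted L hndL, hsort, pv_scan_eq_runOut s hsp]
    unfold pvRunOut
    rw [List.filter_congr (q := fun v => decide (1 < s.count v)) (fun a _ => by rw [hcount a])]
    rw [List.map_map]
    apply List.map_congr_left
    intro a _
    simp [Function.comp, pvMsg, hcount a]
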